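-- pv_equiv track=rewrite | github.com/fwilsch/cubicpts | tests/test_diagonal.py | points_brute
-- ===== SOURCE A (Python) =====
-- def points_brute(bound, a = 2):
--     """
--     Compute solutions to ax^3 + ay^3 + z^3 = 1  of height at most bound
--     by brute force.
--     """
--     sols = []
--     for x in range(-bound, bound+1):
--         for y in range(-bound, bound+1):
--             for z in range(-bound, bound+1):
--                 if z == 1:
--                     continue
--                 if a*x*x*x + a*y*y*y + z*z*z == 1:
--                     sols.append((x, y, z))
--     return sols
-- ===== SOURCE B (Python) =====
-- def points_brute(bound, a=2):
--     """
--     Compute solutions to ax^3 + ay^3 + z^3 = 1 of height at most bound: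
--     for each (x, y), binary-search the unique z in [-bound, bound] with
--     z^3 = 1 - a*x^3 - a*y^3 (cubing is strictly increasing).
--     """
--     sols = []
--     for x in range(-bound, bound + 1):
--         x3 = a * x * x * x
--         for y in range(-bound, bound + 1):
--             t = 1 - x3 - a * y * y * y
--             lo, hi = -bound, bound
--             while lo <= hi:
--                 mid = (lo + hi) // 2
--                 c = mid * mid * mid
--                 if c == t:
--                     if mid != 1:
--                         sols.append((x, y, mid))
--                     break
--                 elif c < t:
--                     lo = mid + 1
--                 else:
--                     hi = mid - 1
--     return sols
-- ===== Notes on version B (the rewrite author's own statement) =====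
-- stated objective: faster
-- what changed: The inner z-loop is replaced by a binary search for the unique integer cube root z of 1 - a*x^3 - a*y^3 in [-bound, bound], turning the triple loop into a double loop.
import Mathlib
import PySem

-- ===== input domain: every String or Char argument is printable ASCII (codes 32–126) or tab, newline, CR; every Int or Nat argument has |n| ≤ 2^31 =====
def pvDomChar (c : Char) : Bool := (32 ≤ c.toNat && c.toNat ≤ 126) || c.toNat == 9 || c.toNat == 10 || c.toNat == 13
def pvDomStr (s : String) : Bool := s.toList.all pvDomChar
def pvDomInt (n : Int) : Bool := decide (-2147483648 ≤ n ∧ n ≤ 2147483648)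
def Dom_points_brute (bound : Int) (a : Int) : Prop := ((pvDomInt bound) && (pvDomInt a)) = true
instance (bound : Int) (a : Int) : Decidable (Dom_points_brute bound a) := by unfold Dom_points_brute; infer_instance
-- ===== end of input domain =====

-- B replaces A's inner z-loop by a binary search for the integer cube root of 1-a*x^3-a*y^3 in [-bound, bound] (objective: faster, O(n^2 log n) loop structure vs A's O(n^3)).


-- ===== PORT A =====
def points_brute (bound : Int) (a : Int) : List (Int × Int × Int) :=
  (PySem.List.pyRange (-bound) (bound+1) 1).foldl (fun sols x =>
    (PySem.List.pyRange (-bound) (bound+1) 1).foldl (fun sols y =>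
      (PySem.List.pyRange (-bound) (bound+1) 1).foldl (fun sols z =>
        if z = 1 then sols
        else if a*x*x*x + a*y*y*y + z*z*z = 1 then sols ++ [(x, y, z)] else sols)
        sols) sols) []

-- ===== PORT B =====
-- binary search (Source B's while loop): the unique z in [lo, hi] with z*z*z = t, if any.
-- Structural fuel (hi+1-lo).toNat bounds the iteration count; it is provably sufficient,
-- so this computes exactly what Source B's while loop computes.
def bsearchGo : Nat → Int → Int → Int → Option Int
  | 0, _, _, _ => none
  | fuel+1, t, lo, hi =>
    if lo ≤ hi then
      if (PySem.Int.floordiv (lo+hi) 2) * (PySem.Int.floordiv (lo+hi) 2) * (PySem.Int.floordiv (lo+hi) 2) = t then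
        some (PySem.Int.floordiv (lo+hi) 2)
      else if (PySem.Int.floordiv (lo+hi) 2) * (PySem.Int.floordiv (lo+hi) 2) * (PySem.Int.floordiv (lo+hi) 2) < t then
        bsearchGo fuel t (PySem.Int.floordiv (lo+hi) 2 + 1) hi
      else
        bsearchGo fuel t lo (PySem.Int.floordiv (lo+hi) 2 - 1)
    else none

def bsearchZ (t lo hi : Int) : Option Int := bsearchGo (hi + 1 - lo).toNat t lo hi

def points_brute_alt (bound : Int) (a : Int) : List (Int × Int × Int) :=
  (PySem.List.pyRange (-bound) (bound+1) 1).foldl (fun sols x =>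
    (PySem.List.pyRange (-bound) (bound+1) 1).foldl (fun sols y =>
      match bsearchZ (1 - a*x*x*x - a*y*y*y) (-bound) bound with
      | some z => if z ≠ 1 then sols ++ [(x, y, z)] else sols
      | none => sols) sols) []

-- ===== PRECONDITION & SPEC =====
def Spec_points_brute (bound : Int) (a : Int) (out : List (Int × Int × Int)) : Prop := out = points_brute_alt bound a
instance (bound : Int) (a : Int) (out : List (Int × Int × Int)) : Decidable (Spec_points_brute bound a out) := by unfold Spec_points_brute; infer_instance

-- ===== CLAIM (what is proved, stated in full; the proofs are below) =====
def Claim_equal_points_brute : Prop := ∀ (bound : Int) (a : Int), Dom_points_brute bound a → Spec_points_brute bound a (points_brute bound a)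

-- ===== LEMMAS AND PROOFS =====

theorem cube_lt {x y : Int} (h : x < y) : x*x*x < y*y*y := by nlinarith [sq_nonneg (x + y), sq_nonneg (x - y), sq_nonneg x, sq_nonneg y]

theorem cube_inj {x y : Int} (h : x*x*x = y*y*y) : x = y := by
  rcases lt_trichotomy x y with hlt | he | hgt
  · exact absurd h (ne_of_lt (cube_lt hlt))
  · exact he
  · exact absurd h.symm (ne_of_lt (cube_lt hgt))

theorem bsearchGo_some {t z : Int} : ∀ {fuel : Nat} {lo hi : Int},
    bsearchGo fuel t lo hi = some z → lo ≤ z ∧ z ≤ hi ∧ z*z*z = t := by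
  intro fuel
  induction fuel with
  | zero => intro lo hi h; simp [bsearchGo] at h
  | succ n ih =>
      intro lo hi h
      simp only [bsearchGo] at h
      split_ifs at h with hle heq hlt
      · have := PySem.Int.floordiv_two_mid_bounds hle
        cases h
        exact ⟨this.1, this.2, heq⟩
      · have := PySem.Int.floordiv_two_mid_bounds hle
        have h2 := ih h
        exact ⟨by omega, h2.2.1, h2.2.2⟩
      · have := PySem.Int.floordiv_two_mid_bounds hle
        have h2 := ih h
        exact ⟨h2.1, by omega, h2.2.2⟩

theorem bsearchGo_complete {t z : Int} : ∀ {fuel : Nat} {lo hi : Int},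
    (hi + 1 - lo).toNat ≤ fuel → lo ≤ z → z ≤ hi → z*z*z = t →
    bsearchGo fuel t lo hi = some z := by
  intro fuel
  induction fuel with
  | zero => intro lo hi hf h1 h2 _; omega
  | succ n ih =>
      intro lo hi hf h1 h2 h3
      have hle : lo ≤ hi := le_trans h1 h2
      have hmid := PySem.Int.floordiv_two_mid_bounds hle
      set m := PySem.Int.floordiv (lo + hi) 2 with hm
      simp only [bsearchGo]
      rw [if_pos hle]
      by_cases heq : m * m * m = t
      · rw [if_pos heq]
        have hmz : m = z := cube_inj (heq.trans h3.symm)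
        exact congrArg some hmz
      · rw [if_neg heq]
        by_cases hlt : m * m * m < t
        · rw [if_pos hlt]
          have hmz : m < z := by
            by_contra hc
            push_neg at hc
            rcases lt_or_eq_of_le hc with hlt2 | he
            · have := cube_lt hlt2; omega
            · exact heq (by rw [← he]; exact h3)
          exact ih (by omega) (by omega) h2 h3
        · rw [if_neg hlt]
          have hzm : z < m := by
            by_contra hc
            push_neg at hc
            rcases lt_or_eq_of_le hc with hlt2 | he
            · have := cube_lt hlt2; omega
            · exact heq (by rw [he]; exact h3)
          exact ih (by omega) h1 (by omega) h3

theorem bsearchZ_some {t lo hi z : Int} (h : bsearchZ t lo hi = some z) :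
    lo ≤ z ∧ z ≤ hi ∧ z*z*z = t := bsearchGo_some h

theorem bsearchZ_complete {t lo hi z : Int} (h1 : lo ≤ z) (h2 : z ≤ hi) (h3 : z*z*z = t) :
    bsearchZ t lo hi = some z := bsearchGo_complete le_rfl h1 h2 h3

theorem filter_unique {l : List Int} {p : Int → Bool} {z : Int}
    (hz : z ∈ l) (hpz : p z = true) (huniq : ∀ w ∈ l, p w = true → w = z)
    (hnd : l.Nodup) : l.filter p = [z] := by
  induction l with
  | nil => simp at hz
  | cons b bs ih =>
      rcases List.mem_cons.mp hz with hb | hbs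
      · subst hb
        have hrest : bs.filter p = [] := by
          apply List.filter_eq_nil_iff.mpr
          intro w hw hpw
          have := huniq w (List.mem_cons_of_mem _ hw) hpw
          subst this
          exact absurd hw (List.nodup_cons.mp hnd).1
        simp [hpz, hrest]
      · have hbz : b ≠ z := by
          intro hbe; subst hbe
          exact absurd hbs (List.nodup_cons.mp hnd).1
        have hpb : p b = false := by
          by_contra hc
          exact hbz (huniq b List.mem_cons_self (by simpa using hc))
        rw [List.filter_cons_of_neg (by simp [hpb])]
        exact ih hbs (fun w hw hpw => huniq w (List.mem_cons_of_mem _ hw) hpw)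
          (List.nodup_cons.mp hnd).2

-- the per-(x,y) inner loop of A equals B's binary-search step
theorem inner_eq (bound a x y : Int) (sols : List (Int × Int × Int)) :
    (PySem.List.pyRange (-bound) (bound+1) 1).foldl (fun sols z =>
        if z = 1 then sols
        else if a*x*x*x + a*y*y*y + z*z*z = 1 then sols ++ [(x, y, z)] else sols) sols
    = match bsearchZ (1 - a*x*x*x - a*y*y*y) (-bound) bound with
      | some z => if z ≠ 1 then sols ++ [(x, y, z)] else sols
      | none => sols := by
  have hstep : (fun (sols : List (Int × Int × Int)) (z : Int) =>
      if z = 1 then sols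
      else if a*x*x*x + a*y*y*y + z*z*z = 1 then sols ++ [(x, y, z)] else sols)
    = fun sols z => if (!decide (z = 1) && decide (a*x*x*x + a*y*y*y + z*z*z = 1)) then sols ++ [(x, y, z)] else sols := by
    funext s z
    by_cases h1 : z = 1 <;> by_cases h2 : a*x*x*x + a*y*y*y + z*z*z = 1 <;> simp [h1, h2]
  rw [hstep, PySem.List.foldl_append_if]
  cases hb : bsearchZ (1 - a*x*x*x - a*y*y*y) (-bound) bound with
  | none =>
      have hfil : (PySem.List.pyRange (-bound) (bound+1) 1).filter
          (fun z => !decide (z = 1) && decide (a*x*x*x + a*y*y*y + z*z*z = 1)) = [] := by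
        apply List.filter_eq_nil_iff.mpr
        intro w hw hpw
        simp only [Bool.and_eq_true, Bool.not_eq_eq_eq_not, Bool.not_true, decide_eq_false_iff_not,
          decide_eq_true_eq] at hpw
        have hmem := (PySem.List.mem_pyRange_one (a := -bound) (b := bound+1) (x := w)).mp hw
        have hw3 : w*w*w = 1 - a*x*x*x - a*y*y*y := by linarith [hpw.2]
        have hcomp := bsearchZ_complete (t := 1 - a*x*x*x - a*y*y*y) (lo := -bound) (hi := bound)
          (z := w) hmem.1 (by omega) hw3
        rw [hcomp] at hb; simp at hb
      rw [hfil]; simp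
  | some z =>
      obtain ⟨hz1, hz2, hz3⟩ := bsearchZ_some hb
      by_cases hzone : z = 1
      · have hfil : (PySem.List.pyRange (-bound) (bound+1) 1).filter
            (fun w => !decide (w = 1) && decide (a*x*x*x + a*y*y*y + w*w*w = 1)) = [] := by
          apply List.filter_eq_nil_iff.mpr
          intro w _ hpw
          simp only [Bool.and_eq_true, Bool.not_eq_eq_eq_not, Bool.not_true, decide_eq_false_iff_not,
            decide_eq_true_eq] at hpw
          have hw3 : w*w*w = z*z*z := by rw [hz3]; linarith [hpw.2]
          exact hpw.1 ((cube_inj hw3).trans hzone)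
        rw [hfil]; simp [hzone]
      · have hfil : (PySem.List.pyRange (-bound) (bound+1) 1).filter
            (fun w => !decide (w = 1) && decide (a*x*x*x + a*y*y*y + w*w*w = 1)) = [z] := by
          apply filter_unique
          · exact (PySem.List.mem_pyRange_one (a := -bound) (b := bound+1) (x := z)).mpr ⟨hz1, by omega⟩
          · simp only [Bool.and_eq_true, Bool.not_eq_eq_eq_not, Bool.not_true, decide_eq_false_iff_not,
              decide_eq_true_eq]
            exact ⟨hzone, by linarith [hz3]⟩
          · intro w _ hpw
            simp only [Bool.and_eq_true, Bool.not_eq_eq_eq_not, Bool.not_true, decide_eq_false_iff_not,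
              decide_eq_true_eq] at hpw
            exact cube_inj (by rw [hz3]; linarith [hpw.2])
          · exact PySem.List.nodup_pyRange_one (-bound) (bound+1)
        rw [hfil]; simp [hzone]

-- ===== VERDICT (by name: the statement is the Claim_ definition above) =====
theorem points_brute_spec : Claim_equal_points_brute := by
  intro bound a _
  unfold Spec_points_brute points_brute points_brute_alt
  apply List.foldl_ext
  intro sols x _
  apply List.foldl_ext
  intro s y _
  exact inner_eq bound a x y s
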